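-- pv_equiv track=rewrite | github.com/JonMukaj/advent_of_code2023 | day14/part2.py | push_rocks
-- ===== SOURCE A (Python) =====
-- def push_rocks(row):
--     count = 0
--     for i, element in enumerate(row):
--         if element == '#' and count > 0:
--             for j in range(i - count, i):
--                 row[j] = 'O'
--             count = 0
--         elif element == 'O':
--             count += 1
--             row[i] = '.'
--
--         if i == len(row) - 1 and count > 0:
--             for k in range(len(row) - count, len(row)):
--                 row[k] = 'O'
--             count = 0
--     return row
-- ===== SOURCE B (Python) =====
-- # Same result as A via a split-and-rebuild strategy: cut the row into '#'-separated
-- # segments, rebuild each segment in closed form (kept prefix + block of 'O's at the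
-- # end), and write the rejoined row back in place (A mutates row in place; so does B).
-- def push_rocks(row):
--     segs = []
--     cur = []
--     for x in row:
--         if x == '#':
--             segs.append(cur)
--             cur = []
--         else:
--             cur.append(x)
--     segs.append(cur)
--     parts = [_settle(seg) for seg in segs]
--     out = parts[0]
--     for p in parts[1:]:
--         out = out + ['#'] + p
--     row[:] = out
--     return row
--
--
-- def _settle(seg):
--     c = seg.count('O')
--     return ['.' if x == 'O' else x for x in seg[:len(seg) - c]] + ['O'] * c
-- ===== Notes on version B (the rewrite author's own statement) =====
-- stated objective: alternative
-- what changed: Replaces A's single streaming pass (running rock counter with in-place index backfills at each '#' and at the row end) by a split-and-rebuild strategy: cut the row into '#'-separated segments, rebuild each segment in closed form as its non-rock prefix plus a replicated block of 'O's, and rejoin with '#'.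
import Mathlib
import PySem

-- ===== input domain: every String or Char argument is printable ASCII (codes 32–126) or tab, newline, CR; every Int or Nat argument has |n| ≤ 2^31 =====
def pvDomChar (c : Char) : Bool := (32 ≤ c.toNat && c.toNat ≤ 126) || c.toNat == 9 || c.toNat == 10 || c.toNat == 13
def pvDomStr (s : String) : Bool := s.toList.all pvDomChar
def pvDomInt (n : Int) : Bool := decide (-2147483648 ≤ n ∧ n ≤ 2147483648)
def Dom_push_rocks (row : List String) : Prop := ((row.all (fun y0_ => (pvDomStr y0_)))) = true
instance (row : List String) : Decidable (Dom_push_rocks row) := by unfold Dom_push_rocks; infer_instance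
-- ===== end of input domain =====

-- B rebuilds the row segment-by-segment instead of A's streaming counter with index backfills.
-- Both Pythons mutate `row` in place; the equivalence proved here is about the RETURN value.

-- ===== PORT A =====
-- Python 'for j in range(a, b): row[j] = "O"'. All indices A writes are provably
-- nonnegative and in range (count ≤ i ≤ len(row)), so Nat indexing/List.set is exact here.
def pvFillO (r : List String) (a b : Nat) : List String :=
  (List.range' a (b - a)).foldl (fun r2 j => r2.set j "O") r

-- the body of A's for-loop over enumerate(row); `n` is len(row) (unchanged by the writes).
-- `element` is read from the live, mutated list `r` at index i, exactly as Python's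
-- enumerate of a list being mutated does.
def pvStepA (n : Nat) (st : List String × Nat) (i : Nat) : List String × Nat :=
  let r := st.1
  let count := st.2
  let element := r.getD i ""
  let st2 : List String × Nat :=
    if element = "#" ∧ 0 < count then (pvFillO r (i - count) i, 0)
    else if element = "O" then (r.set i ".", count + 1)
    else (r, count)
  if i = n - 1 ∧ 0 < st2.2 then (pvFillO st2.1 (n - st2.2) n, 0)
  else st2

def push_rocks (row : List String) : List String :=
  ((List.range row.length).foldl (pvStepA row.length) (row, 0)).1

-- ===== PORT B =====
-- B's _settle: kept (non-rock) prefix, mapped 'O'→'.', then a block of c rocks.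
def pvSettle (seg : List String) : List String :=
  let c := seg.count "O"
  (seg.take (seg.length - c)).map (fun x => if x = "O" then "." else x) ++ List.replicate c "O"

def push_rocks_alt (row : List String) : List String :=
  let p := row.foldl
    (fun (st : List (List String) × List String) x =>
      if x = "#" then (st.1 ++ [st.2], []) else (st.1, st.2 ++ [x]))
    (([] : List (List String)), ([] : List String))
  let segs := p.1 ++ [p.2]
  let parts := segs.map pvSettle
  match parts with
  | [] => []  -- unreachable: segs is nonempty (Python's parts[0])
  | q :: qs => qs.foldl (fun out p2 => out ++ ["#"] ++ p2) q

-- ===== PRECONDITION & SPEC =====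
def Spec_push_rocks (row : List String) (out : List String) : Prop := out = push_rocks_alt row
instance (row : List String) (out : List String) : Decidable (Spec_push_rocks row out) := by unfold Spec_push_rocks; infer_instance

-- ===== CLAIM (what is proved, stated in full; the proofs are below) =====
def Claim_equal_push_rocks : Prop := ∀ (row : List String), Dom_push_rocks row → Spec_push_rocks row (push_rocks row)

-- ===== LEMMAS AND PROOFS =====

-- the common abstract left-to-right specification both ports are reduced to:
-- `acc` = settled output so far, `m` = current segment mapped so far, `c` = rocks seen in it.
def pvSegOut (m : List String) (c : Nat) : List String :=
  m.take (m.length - c) ++ List.replicate c "O"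

def pvGo (acc m : List String) (c : Nat) : List String → List String
  | [] => acc ++ pvSegOut m c
  | x :: xs =>
      if x = "#" then pvGo (acc ++ pvSegOut m c ++ ["#"]) [] 0 xs
      else pvGo acc (m ++ [if x = "O" then "." else x]) (c + if x = "O" then 1 else 0) xs

lemma pvSegOut_length (m : List String) (c : Nat) (h : c ≤ m.length) :
    (pvSegOut m c).length = m.length := by
  simp [pvSegOut]; omega

lemma pvSegOut_zero (m : List String) : pvSegOut m 0 = m := by simp [pvSegOut]

-- filling a contiguous block with "O"
lemma pvFillO_eq (b : List String) : ∀ (a rest : List String),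
    pvFillO (a ++ b ++ rest) a.length (a.length + b.length) =
      a ++ List.replicate b.length "O" ++ rest := by
  induction b with
  | nil => intro a rest; simp [pvFillO]
  | cons y b ih =>
      intro a rest
      have h2 : (a ++ y :: b ++ rest).set a.length "O" = (a ++ ["O"]) ++ b ++ rest := by
        simp
      have h3 := ih (a ++ ["O"]) rest
      simp only [pvFillO, List.length_append, List.length_cons, List.length_nil] at h3 ⊢
      rw [show a.length + (b.length + 1) - a.length = b.length + 1 by omega,
        List.range'_succ, List.foldl_cons, h2]
      rw [show a.length + (0 + 1) + b.length - (a.length + (0 + 1)) = b.length by omega] at h3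
      rw [show a.length + 1 = a.length + (0 + 1) by omega, h3]
      simp [List.replicate_succ]

lemma pvGetD_mid (a : List String) (x : String) (rest : List String) :
    (a ++ x :: rest).getD a.length "" = x := by
  simp [List.getD]

lemma pvSet_mid (a : List String) (x v : String) (rest : List String) :
    (a ++ x :: rest).set a.length v = a ++ v :: rest := by
  simp

lemma pvFill_main (acc m : List String) (c : Nat) (hc : c ≤ m.length) (rest : List String) :
    pvFillO (acc ++ m ++ rest) (acc.length + m.length - c) (acc.length + m.length) =
      acc ++ pvSegOut m c ++ rest := by
  have h := pvFillO_eq (m.drop (m.length - c)) (acc ++ m.take (m.length - c)) rest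
  have e4 : (List.drop (m.length - c) m).length = c := by simp; omega
  rw [e4] at h
  have e1 : acc ++ List.take (m.length - c) m ++ List.drop (m.length - c) m ++ rest =
      acc ++ m ++ rest := by
    rw [List.append_assoc acc (List.take (m.length - c) m) (List.drop (m.length - c) m),
      List.take_append_drop]
  have e2 : (acc ++ List.take (m.length - c) m).length = acc.length + m.length - c := by
    simp; omega
  rw [e1, e2, show acc.length + m.length - c + c = acc.length + m.length by omega] at h
  rw [h, pvSegOut]
  simp

lemma lemA (n : Nat) (sfx : List String) : ∀ (acc m : List String) (c : Nat),
    acc.length + m.length + sfx.length = n → c ≤ m.length → (sfx = [] → c = 0) →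
    ((List.range' (acc.length + m.length) sfx.length).foldl (pvStepA n)
        (acc ++ m ++ sfx, c)).1 = pvGo acc m c sfx := by
  induction sfx with
  | nil =>
      intro acc m c hn hc h0
      simp [pvGo, pvSegOut, h0 rfl]
  | cons x xs ih =>
      intro acc m c hn hc h0
      have hn' : acc.length + m.length + xs.length + 1 = n := by
        simp only [List.length_cons] at hn; omega
      have hel : (acc ++ m ++ x :: xs).getD (acc.length + m.length) "" = x := by
        simpa using pvGetD_mid (acc ++ m) x xs
      rw [List.length_cons, List.range'_succ, List.foldl_cons]
      by_cases hxs : xs = []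
      · -- last element of the row: the trailing flush of A fires here
        subst hxs
        simp only [List.length_nil, List.range'_zero, List.foldl_nil]
        have hn1 : n = acc.length + m.length + 1 := by
          simp only [List.length_nil] at hn'; omega
        rw [hn1]
        by_cases hx : x = "#"
        · subst hx
          by_cases hc0 : 0 < c
          · simp [pvStepA, hc0, pvGo, pvSegOut_zero]
            simpa using pvFill_main acc m c hc ["#"]
          · have hc' : c = 0 := by omega
            subst hc'
            simp [pvStepA, pvGo, pvSegOut_zero]
        · by_cases hx2 : x = "O"
          · subst hx2
            have hset : (acc ++ m ++ ["O"]).set (acc.length + m.length) "." =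
                acc ++ m ++ ["."] := by
              simpa using pvSet_mid (acc ++ m) "O" "." []
            simp [pvStepA, pvGo]
            have h2 := pvFill_main acc (m ++ ["."]) (c + 1)
              (by simp only [List.length_append, List.length_cons, List.length_nil]; omega) []
            simp only [List.append_nil, List.length_append, List.length_cons,
              List.length_nil] at h2
            rw [show acc.length + m.length - c = acc.length + (m.length + 1) - (c + 1) by omega,
              show acc.length + m.length + 1 = acc.length + (m.length + 1) by omega]
            exact h2
          · by_cases hc0 : 0 < c
            · simp [pvStepA, hx, hx2, hc0, pvGo]
              have h2 := pvFill_main acc (m ++ [x]) c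
                (by simp only [List.length_append, List.length_cons, List.length_nil]; omega) []
              simp only [List.append_nil, List.length_append, List.length_cons,
                List.length_nil] at h2
              rw [show acc.length + m.length + 1 - c = acc.length + (m.length + 1) - c by omega,
                show acc.length + m.length + 1 = acc.length + (m.length + 1) by omega]
              exact h2
            · have hc' : c = 0 := by omega
              subst hc'
              simp [pvStepA, hx, hx2, pvGo, pvSegOut_zero]
      · have hlen : 0 < xs.length := List.length_pos_iff.mpr hxs
        have hne : ¬ (acc.length + m.length = n - 1) := by omega
        by_cases hx : x = "#"
        · subst hx
          by_cases hc0 : 0 < c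
          · have hstep : pvStepA n (acc ++ m ++ "#" :: xs, c) (acc.length + m.length) =
                (acc ++ pvSegOut m c ++ "#" :: xs, 0) := by
              simp [pvStepA, hc0, hne]
              simpa using pvFill_main acc m c hc ("#" :: xs)
            rw [hstep,
              show acc ++ pvSegOut m c ++ "#" :: xs = acc ++ pvSegOut m c ++ ["#"] ++ xs
                from by simp,
              show acc.length + m.length + 1 =
                  (acc ++ pvSegOut m c ++ ["#"]).length + ([] : List String).length
                from by
                  simp only [List.length_append, List.length_cons, List.length_nil,
                    pvSegOut_length m c hc]
                  try omega,
              show acc ++ pvSegOut m c ++ ["#"] ++ xs =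
                  acc ++ pvSegOut m c ++ ["#"] ++ ([] : List String) ++ xs from by simp,
              ih (acc ++ pvSegOut m c ++ ["#"]) [] 0
                (by
                  simp only [List.length_append, List.length_cons, List.length_nil,
                    pvSegOut_length m c hc]
                  try omega) (by omega)
                (fun h => rfl)]
            simp [pvGo]
          · have hc' : c = 0 := by omega
            subst hc'
            have hstep : pvStepA n (acc ++ m ++ "#" :: xs, 0) (acc.length + m.length) =
                (acc ++ m ++ "#" :: xs, 0) := by
              simp [pvStepA, hne]
            rw [hstep,
              show acc ++ m ++ "#" :: xs = acc ++ m ++ ["#"] ++ xs from by simp,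
              show acc.length + m.length + 1 =
                  (acc ++ m ++ ["#"]).length + ([] : List String).length from by
                simp only [List.length_append, List.length_cons, List.length_nil]; try omega,
              show acc ++ m ++ ["#"] ++ xs = acc ++ m ++ ["#"] ++ ([] : List String) ++ xs
                from by simp,
              ih (acc ++ m ++ ["#"]) [] 0
                (by simp only [List.length_append, List.length_cons, List.length_nil]; try omega)
                (by omega) (fun h => rfl)]
            simp [pvGo, pvSegOut_zero]
        · by_cases hx2 : x = "O"
          · subst hx2
            have hset : (acc ++ m ++ "O" :: xs).set (acc.length + m.length) "." =
                acc ++ m ++ "." :: xs := by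
              simpa using pvSet_mid (acc ++ m) "O" "." xs
            have hstep : pvStepA n (acc ++ m ++ "O" :: xs, c) (acc.length + m.length) =
                (acc ++ m ++ "." :: xs, c + 1) := by
              simp [pvStepA, hne, hset]
            rw [hstep,
              show acc ++ m ++ "." :: xs = acc ++ (m ++ ["."]) ++ xs from by simp,
              show acc.length + m.length + 1 = acc.length + (m ++ ["."]).length from by
                simp only [List.length_append, List.length_cons, List.length_nil]; try omega,
              ih acc (m ++ ["."]) (c + 1)
                (by simp only [List.length_append, List.length_cons, List.length_nil]; try omega)
                (by simp only [List.length_append, List.length_cons, List.length_nil]; try omega)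
                (fun h => absurd h hxs)]
            simp [pvGo]
          · have hstep : pvStepA n (acc ++ m ++ x :: xs, c) (acc.length + m.length) =
                (acc ++ m ++ x :: xs, c) := by
              simp [pvStepA, hne, hx, hx2]
            rw [hstep,
              show acc ++ m ++ x :: xs = acc ++ (m ++ [x]) ++ xs from by simp,
              show acc.length + m.length + 1 = acc.length + (m ++ [x]).length from by
                simp only [List.length_append, List.length_cons, List.length_nil]; try omega,
              ih acc (m ++ [x]) c
                (by simp only [List.length_append, List.length_cons, List.length_nil]; try omega)
                (by simp only [List.length_append, List.length_cons, List.length_nil]; try omega)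
                (fun h => absurd h hxs)]
            simp [pvGo, hx, hx2]

-- B-side: recursive form of the split fold
def pvSplit1 (cur : List String) : List String → List (List String)
  | [] => [cur]
  | x :: xs => if x = "#" then cur :: pvSplit1 [] xs else pvSplit1 (cur ++ [x]) xs

def pvJoin : List (List String) → List String
  | [] => []
  | q :: qs => q ++ qs.flatMap (fun p2 => "#" :: p2)

lemma pvSplit1_ne_nil (xs : List String) : ∀ cur, pvSplit1 cur xs ≠ [] := by
  induction xs with
  | nil => intro cur; simp [pvSplit1]
  | cons x xs ih => intro cur; by_cases h : x = "#" <;> simp [pvSplit1, h, ih]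

lemma pvSplit_fold (xs : List String) : ∀ (S : List (List String)) (C : List String),
    (let p := xs.foldl
        (fun (st : List (List String) × List String) x =>
          if x = "#" then (st.1 ++ [st.2], []) else (st.1, st.2 ++ [x])) (S, C)
     p.1 ++ [p.2]) = S ++ pvSplit1 C xs := by
  induction xs with
  | nil => intro S C; simp [pvSplit1]
  | cons x xs ih =>
      intro S C
      by_cases h : x = "#" <;> simp only [pvSplit1, h, List.foldl_cons, if_pos, ite_false] <;>
        rw [ih] <;> simp

lemma pvJoinFold (qs : List (List String)) : ∀ q,
    qs.foldl (fun out p2 => out ++ ["#"] ++ p2) q = pvJoin (q :: qs) := by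
  induction qs with
  | nil => intro q; simp [pvJoin]
  | cons r qs ih => intro q; rw [List.foldl_cons, ih]; simp [pvJoin]

lemma pvSettle_eq (C : List String) :
    pvSettle C = pvSegOut (C.map (fun x => if x = "O" then "." else x)) (C.count "O") := by
  simp [pvSettle, pvSegOut, List.map_take]

lemma pvHashJoin (qs : List (List String)) (h : qs ≠ []) :
    ["#"] ++ pvJoin qs = qs.flatMap (fun p2 => "#" :: p2) := by
  cases qs with
  | nil => exact absurd rfl h
  | cons q qs => simp [pvJoin]

lemma pvCount_snoc (C : List String) (x : String) :
    (C ++ [x]).count "O" = C.count "O" + (if x = "O" then 1 else 0) := by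
  by_cases hx : x = "O" <;> simp [List.count_append, hx]

lemma lemB (xs : List String) : ∀ (acc C : List String),
    pvGo acc (C.map (fun x => if x = "O" then "." else x)) (C.count "O") xs =
      acc ++ pvJoin ((pvSplit1 C xs).map pvSettle) := by
  induction xs with
  | nil =>
      intro acc C
      simp [pvGo, pvSplit1, pvJoin, pvSettle_eq]
  | cons x xs ih =>
      intro acc C
      by_cases h : x = "#"
      · have hne : (pvSplit1 [] xs).map pvSettle ≠ [] := by
          simp [pvSplit1_ne_nil]
        have hih := ih (acc ++ pvSegOut (C.map (fun x => if x = "O" then "." else x))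
          (C.count "O") ++ ["#"]) []
        simp only [List.map_nil, List.count_nil] at hih
        simp only [pvGo, h, reduceIte, hih, pvSplit1, List.map_cons]
        rw [show pvJoin (pvSettle C :: (pvSplit1 [] xs).map pvSettle) =
            pvSettle C ++ ((pvSplit1 [] xs).map pvSettle).flatMap (fun p2 => "#" :: p2) from rfl]
        rw [← pvHashJoin _ hne, pvSettle_eq]
        simp
      · have hih := ih acc (C ++ [x])
        rw [pvCount_snoc] at hih
        simp only [List.map_append, List.map_cons, List.map_nil] at hih
        simp only [pvGo, h, ite_false, pvSplit1]
        simpa [pvSplit1, h] using hih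

lemma pvA_eq_go (row : List String) : push_rocks row = pvGo [] [] 0 row := by
  have := lemA row.length row [] [] 0 (by simp) (by simp) (by simp)
  simpa [push_rocks, List.range_eq_range'] using this

lemma pvB_eq_go (row : List String) : push_rocks_alt row = pvGo [] [] 0 row := by
  have hs := pvSplit_fold row [] []
  have hb := lemB row [] []
  simp only [List.map_nil, List.count_nil] at hb
  rw [hb]
  simp only [push_rocks_alt]
  rcases hmap : (pvSplit1 [] row).map pvSettle with _ | ⟨q, qs⟩
  · exact absurd (List.map_eq_nil_iff.mp hmap) (pvSplit1_ne_nil row [])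
  · simp only at hs
    rw [show (row.foldl (fun (st : List (List String) × List String) x =>
          if x = "#" then (st.1 ++ [st.2], []) else (st.1, st.2 ++ [x])) ([], [])).1 ++
        [(row.foldl (fun (st : List (List String) × List String) x =>
          if x = "#" then (st.1 ++ [st.2], []) else (st.1, st.2 ++ [x])) ([], [])).2] =
        pvSplit1 [] row from by simpa using hs, hmap]
    show qs.foldl (fun out p2 => out ++ ["#"] ++ p2) q = [] ++ pvJoin (q :: qs)
    rw [pvJoinFold]
    simp

-- ===== VERDICT (by name: the statement is the Claim_ definition above) =====
theorem push_rocks_spec : Claim_equal_push_rocks := by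
  intro row _
  unfold Spec_push_rocks
  rw [pvA_eq_go, pvB_eq_go]
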